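-- pv_equiv track=rewrite | github.com/sligara7/dnd_creator | backend/standalone.py | _determine_background_bonuses
-- ===== SOURCE A (Python) =====
-- from typing import Dict, Any, List, Optional, Set, Tuple
-- from typing import Dict, Any, List, Optional, Callable
--
-- def _determine_background_bonuses(background: str, description: str) -> Dict[str, int]:
--     """Determine ability score bonuses from background (2024 rules)."""
--     # 2024 D&D: Background provides +2/+1 or +1/+1/+1 to abilities
--     # This is a simplified implementation - could be more sophisticated
--
--     description_lower = description.lower()
--
--     # Analyze description for primary/secondary abilities
--     ability_indicators = {
--         "strength": ["strong", "muscular", "warrior", "fighter", "physical"],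
--         "dexterity": ["agile", "quick", "nimble", "thief", "rogue", "archer"],
--         "constitution": ["hardy", "tough", "resilient", "enduring"],
--         "intelligence": ["smart", "clever", "wizard", "scholar", "learned"],
--         "wisdom": ["wise", "perceptive", "cleric", "druid", "insightful"],
--         "charisma": ["charming", "leader", "bard", "sorcerer", "persuasive"]
--     }
--
--     # Score abilities based on description
--     ability_scores = {}
--     for ability, indicators in ability_indicators.items():
--         score = sum(1 for indicator in indicators if indicator in description_lower)
--         ability_scores[ability] = score
--
--     # Find top 2 abilities
--     sorted_abilities = sorted(ability_scores.items(), key=lambda x: x[1], reverse=True)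
--
--     if sorted_abilities[0][1] > sorted_abilities[1][1]:
--         # Clear primary ability gets +2, secondary gets +1
--         return {
--             sorted_abilities[0][0]: 2,
--             sorted_abilities[1][0]: 1
--         }
--     else:
--         # Tied scores, distribute +1/+1/+1 to top 3
--         return {
--             sorted_abilities[0][0]: 1,
--             sorted_abilities[1][0]: 1,
--             sorted_abilities[2][0]: 1
--         }
-- ===== SOURCE B (Python) =====
-- def _determine_background_bonuses(background: str, description: str) -> dict:
--     """Same bonuses as A, but a single linear pass keeping the best three
--     (ability, score) slots instead of sorting all six entries."""
--     dl = description.lower()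
--     order = [
--         ("strength", ["strong", "muscular", "warrior", "fighter", "physical"]),
--         ("dexterity", ["agile", "quick", "nimble", "thief", "rogue", "archer"]),
--         ("constitution", ["hardy", "tough", "resilient", "enduring"]),
--         ("intelligence", ["smart", "clever", "wizard", "scholar", "learned"]),
--         ("wisdom", ["wise", "perceptive", "cleric", "druid", "insightful"]),
--         ("charisma", ["charming", "leader", "bard", "sorcerer", "persuasive"]),
--     ]
--     b1 = b2 = b3 = ("", -1)
--     for name, indicators in order:
--         s = sum(ind in dl for ind in indicators)
--         # strictly-greater updates: ties keep the earlier ability,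
--         # exactly like the stable reverse sort
--         if s > b1[1]:
--             b1, b2, b3 = (name, s), b1, b2
--         elif s > b2[1]:
--             b2, b3 = (name, s), b2
--         elif s > b3[1]:
--             b3 = (name, s)
--     if b1[1] > b2[1]:
--         return {b1[0]: 2, b2[0]: 1}
--     return {b1[0]: 1, b2[0]: 1, b3[0]: 1}
-- ===== Notes on version B (the rewrite author's own statement) =====
-- stated objective: alternative
-- what changed: Replaces the full stable reverse-sort of all six (ability, score) pairs by a single linear pass that maintains the best three slots with strictly-greater updates (ties keep the earlier ability), then applies the same +2/+1 vs +1/+1/+1 branch.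
import Mathlib
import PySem

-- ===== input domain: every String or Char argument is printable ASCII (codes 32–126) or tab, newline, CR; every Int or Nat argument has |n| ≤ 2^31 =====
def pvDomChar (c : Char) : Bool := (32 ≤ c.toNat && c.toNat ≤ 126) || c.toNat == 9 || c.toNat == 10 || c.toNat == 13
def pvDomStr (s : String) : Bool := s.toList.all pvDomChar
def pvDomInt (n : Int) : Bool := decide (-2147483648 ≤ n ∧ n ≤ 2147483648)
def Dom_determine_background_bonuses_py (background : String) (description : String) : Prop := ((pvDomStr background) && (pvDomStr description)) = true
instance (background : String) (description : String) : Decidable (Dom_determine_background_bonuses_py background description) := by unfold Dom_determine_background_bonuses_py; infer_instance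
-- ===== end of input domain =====

-- B replaces the stable reverse sort of the six scored abilities by one linear pass
-- keeping the best three slots (strictly-greater updates preserve the sort's tie rule).

-- ===== PORT A =====
def pvAbilityIndicators : List (String × List String) :=
  [("strength", ["strong", "muscular", "warrior", "fighter", "physical"]),
   ("dexterity", ["agile", "quick", "nimble", "thief", "rogue", "archer"]),
   ("constitution", ["hardy", "tough", "resilient", "enduring"]),
   ("intelligence", ["smart", "clever", "wizard", "scholar", "learned"]),
   ("wisdom", ["wise", "perceptive", "cleric", "druid", "insightful"]),
   ("charisma", ["charming", "leader", "bard", "sorcerer", "persuasive"])]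

def determine_background_bonuses_py (background : String) (description : String) : List (String × Int) :=
  let description_lower := PySem.Str.lower description
  let ability_scores : PySem.Dict String Int :=
    pvAbilityIndicators.foldl
      (fun d p =>
        d.insert p.1
          (p.2.foldl (fun acc ind => if PySem.Str.isIn ind description_lower then acc + 1 else acc) 0))
      PySem.Dict.empty
  let sorted_abilities := PySem.List.sorted ability_scores.items (fun x => x.2) true
  -- Python indexes sorted_abilities[0]/[1]/[2]; the list always has six entries, so the
  -- match plays the role of those three always-in-range subscripts
  match sorted_abilities with
  | a :: b :: c :: _ =>
    if a.2 > b.2 then [(a.1, 2), (b.1, 1)]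
    else [(a.1, 1), (b.1, 1), (c.1, 1)]
  | _ => []

-- ===== PORT B =====
def determine_background_bonuses_py_alt (background : String) (description : String) : List (String × Int) :=
  let dl := PySem.Str.lower description
  let t :=
    pvAbilityIndicators.foldl
      (fun (t : (String × Int) × (String × Int) × (String × Int)) p =>
        let s : Int := (p.2.countP (fun ind => PySem.Str.isIn ind dl) : Int)
        if s > t.1.2 then ((p.1, s), t.1, t.2.1)
        else if s > t.2.1.2 then (t.1, (p.1, s), t.2.1)
        else if s > t.2.2.2 then (t.1, t.2.1, (p.1, s))
        else t)
      (("", -1), ("", -1), ("", -1))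
  if t.1.2 > t.2.1.2 then [(t.1.1, 2), (t.2.1.1, 1)]
  else [(t.1.1, 1), (t.2.1.1, 1), (t.2.2.1, 1)]

-- ===== PRECONDITION & SPEC =====
def Spec_determine_background_bonuses_py (background : String) (description : String) (out : List (String × Int)) : Prop := out = determine_background_bonuses_py_alt background description
instance (background : String) (description : String) (out : List (String × Int)) : Decidable (Spec_determine_background_bonuses_py background description out) := by unfold Spec_determine_background_bonuses_py; infer_instance

-- ===== CLAIM (what is proved, stated in full; the proofs are below) =====
def Claim_equal_determine_background_bonuses_py : Prop := ∀ (background : String) (description : String), Dom_determine_background_bonuses_py background description → Spec_determine_background_bonuses_py background description (determine_background_bonuses_py background description)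

-- ===== LEMMAS AND PROOFS =====

-- the first three entries of a list, padded with B's sentinel
def pvPad3 (l : List (String × Int)) : (String × Int) × (String × Int) × (String × Int) :=
  (l.getD 0 ("", -1), l.getD 1 ("", -1), l.getD 2 ("", -1))

-- one strictly-greater top-3 update = one stable descending insertion, seen through pvPad3
lemma pv_step_pad3 (x : String × Int) (hx : -1 < x.2) (l : List (String × Int)) :
    (if x.2 > (pvPad3 l).1.2 then (x, (pvPad3 l).1, (pvPad3 l).2.1)
     else if x.2 > (pvPad3 l).2.1.2 then ((pvPad3 l).1, x, (pvPad3 l).2.1)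
     else if x.2 > (pvPad3 l).2.2.2 then ((pvPad3 l).1, (pvPad3 l).2.1, x)
     else pvPad3 l)
    = pvPad3 (PySem.List.insertBy (fun a b => decide (b.2 < a.2)) x l) := by
  match l with
  | [] => simp [pvPad3, PySem.List.insertBy]; omega
  | [a] =>
    simp only [pvPad3, PySem.List.insertBy, List.getD]
    split_ifs <;> simp_all <;> omega
  | [a, b] =>
    simp only [pvPad3, PySem.List.insertBy, List.getD]
    split_ifs <;> simp_all <;> omega
  | a :: b :: c :: rest =>
    simp only [pvPad3, PySem.List.insertBy, List.getD]
    split_ifs <;> simp_all <;> omega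

-- the whole pass: folding B's update over xs = pvPad3 of the insertion sort's fold
lemma pv_fold_pad3 (xs : List (String × Int)) : ∀ acc : List (String × Int),
    (∀ p ∈ xs, -1 < p.2) →
    xs.foldl
      (fun (t : (String × Int) × (String × Int) × (String × Int)) p =>
        if p.2 > t.1.2 then (p, t.1, t.2.1)
        else if p.2 > t.2.1.2 then (t.1, p, t.2.1)
        else if p.2 > t.2.2.2 then (t.1, t.2.1, p)
        else t)
      (pvPad3 acc)
    = pvPad3 (xs.foldl (fun acc x => PySem.List.insertBy (fun a b => decide (b.2 < a.2)) x acc) acc) := by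
  induction xs with
  | nil => intro acc _; rfl
  | cons x xs ih =>
    intro acc h
    simp only [List.foldl]
    rw [pv_step_pad3 x (h x (by simp)) acc]
    exact ih _ (fun p hp => h p (by simp [hp]))

-- A's score dict is a loop over six fresh distinct keys, so its items list is a map
lemma pv_items (c : (String × List String) → Int) :
    (pvAbilityIndicators.foldl (fun d p => d.insert p.1 (c p)) PySem.Dict.empty).items
    = pvAbilityIndicators.map (fun p => (p.1, c p)) := by
  rw [PySem.Dict.items_foldl_insert_fresh (k := fun p => p.1) (v := c)]
  · rfl
  · intro a _; simp
  · decide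

-- B's fold over the indicator table is the pure top-3 fold over the scored pairs
lemma pv_foldl_map_step (c : (String × List String) → Int)
    (init : (String × Int) × (String × Int) × (String × Int)) :
    pvAbilityIndicators.foldl
      (fun t p =>
        if c p > t.1.2 then ((p.1, c p), t.1, t.2.1)
        else if c p > t.2.1.2 then (t.1, (p.1, c p), t.2.1)
        else if c p > t.2.2.2 then (t.1, t.2.1, (p.1, c p))
        else t) init
    = (pvAbilityIndicators.map (fun p => (p.1, c p))).foldl
      (fun t p =>
        if p.2 > t.1.2 then (p, t.1, t.2.1)
        else if p.2 > t.2.1.2 then (t.1, p, t.2.1)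
        else if p.2 > t.2.2.2 then (t.1, t.2.1, p)
        else t) init := by
  rw [List.foldl_map]

-- ===== VERDICT (by name: the statement is the Claim_ definition above) =====
theorem determine_background_bonuses_py_spec : Claim_equal_determine_background_bonuses_py := by
  intro background description _
  unfold Spec_determine_background_bonuses_py determine_background_bonuses_py determine_background_bonuses_py_alt
  dsimp only
  rw [pv_items, pv_foldl_map_step]
  simp only [PySem.List.foldl_if_add_one, zero_add]
  generalize hL : List.map (fun p => (p.1, ((p.2.countP (fun ind => PySem.Str.isIn ind (PySem.Str.lower description)) : Nat) : Int))) pvAbilityIndicators = L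
  have hlen : L.length = 6 := by rw [← hL]; simp [pvAbilityIndicators]
  have hmem : ∀ p ∈ L, -1 < p.2 := by
    rw [← hL]; intro p hp
    simp only [List.mem_map] at hp
    obtain ⟨q, _, rfl⟩ := hp
    dsimp only
    omega
  have hpad : (((("", -1), ("", -1), ("", -1))) : (String × Int) × (String × Int) × (String × Int)) = pvPad3 [] := rfl
  rw [hpad, pv_fold_pad3 _ [] hmem, ← PySem.List.sorted_rev_eq_foldl_insertBy]
  have hslen : (PySem.List.sorted L (fun x => x.2) true).length = 6 := by
    rw [PySem.List.length_sorted]; exact hlen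
  rcases hS : PySem.List.sorted L (fun x => x.2) true with
    _ | ⟨a, _ | ⟨b, _ | ⟨c, rest⟩⟩⟩ <;> rw [hS] at hslen <;> simp at hslen
  simp [pvPad3]
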